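-- pv_equiv track=rewrite | github.com/WiktoriaWezgraj/Python | 04-Functions/7-18.py | f
-- ===== SOURCE A (Python) =====
-- def f(number):
--     sum = 0
--     stri = ""
--     stri_repeated = ""
--     for digit in str(number):
--         if digit not in stri:
--             stri+=digit
--         elif digit in stri:
--             stri_repeated += digit
--     stri_repeated += stri_repeated[0]
--     for num in stri_repeated:
--         sum += int(num)
--     return sum
-- ===== SOURCE B (Python) =====
-- def f(number):
--     s = str(number)
--     cnt = {}
--     for c in s:
--         cnt[c] = cnt.get(c, 0) + 1
--     total = sum(int(c) * (n - 1) for c, n in cnt.items() if n > 1)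
--     seen = set()
--     for c in s:
--         if c in seen:
--             return total + int(c)
--         seen.add(c)
--     raise ValueError("no repeated character in " + s)
-- ===== Notes on version B (the rewrite author's own statement) =====
-- stated objective: alternative
-- what changed: B replaces A's per-occurrence accumulation into strings (collect every repeated occurrence into stri_repeated, append its first element, then loop summing int() over it) by a frequency counter with a count-weighted closed-form sum int(c)*(count[c]-1) over distinct characters, plus one early-return scan with a seen set that finds the first repeated character.
import Mathlib
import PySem

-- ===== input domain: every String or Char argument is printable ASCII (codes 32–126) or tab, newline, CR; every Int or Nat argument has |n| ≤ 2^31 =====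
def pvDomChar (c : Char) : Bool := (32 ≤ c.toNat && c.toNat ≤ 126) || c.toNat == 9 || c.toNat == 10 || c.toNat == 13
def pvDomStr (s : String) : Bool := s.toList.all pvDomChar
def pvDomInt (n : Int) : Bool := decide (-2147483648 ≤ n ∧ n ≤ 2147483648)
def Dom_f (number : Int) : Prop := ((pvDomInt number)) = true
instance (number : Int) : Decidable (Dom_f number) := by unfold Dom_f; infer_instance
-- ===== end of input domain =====

-- B replaces A's per-occurrence string accumulation + second summation loop by a frequency
-- counter with a count-weighted sum int(c)*(count-1) over distinct characters, plus one
-- early-return seen-set scan for the first repeated character (objective: alternative).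

-- int(c) for a one-character string c; under Pre_f every char it is applied to is a digit,
-- so the getD 0 default is unreachable (Python would raise ValueError only off that domain).
def pvVal (c : Char) : Int := (PySem.Int.ofStr? (String.ofList [c])).getD 0

-- ===== PORT A =====
-- loop body of A: `if digit not in stri: stri += digit elif digit in stri: stri_repeated += digit`
-- (membership of a 1-char string in a string = List.contains on the char list)
def pvStepA (p : List Char × List Char) (digit : Char) : List Char × List Char :=
  if ¬ (p.1.contains digit) then (p.1 ++ [digit], p.2)
  else if p.1.contains digit then (p.1, p.2 ++ [digit])
  else p

def f (number : Int) : Int :=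
  let st := (PySem.Int.toChars number).foldl pvStepA ([], [])
  -- stri_repeated += stri_repeated[0]: IndexError when st.2 = [] — excluded by Pre_f, getD unreachable there
  let rep := st.2 ++ [(PySem.List.pyGet? st.2 0).getD ' ']
  rep.foldl (fun sum num => sum + pvVal num) 0

-- ===== PORT B =====
-- early-return loop of B: `for c in s: if c in seen: return total+int(c); seen.add(c)`
def pvFirstRep (seen : PySem.Set Char) : List Char → Option Char
  | [] => none
  | c :: t => if PySem.Set.contains seen c then some c else pvFirstRep (PySem.Set.add seen c) t

def f_alt (number : Int) : Int :=
  let s := PySem.Int.toChars number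
  -- `cnt[c] = cnt.get(c, 0) + 1` over s
  let cnt := s.foldl (fun d c => d.insert c (d.getD c 0 + 1)) PySem.Dict.empty
  -- sum(int(c) * (n - 1) for c, n in cnt.items() if n > 1)
  let total := ((cnt.items.filter (fun p => 1 < p.2)).map (fun p => pvVal p.1 * (p.2 - 1))).sum
  -- B raises ValueError when s has no repeated char — excluded by Pre_f, getD unreachable there
  total + pvVal ((pvFirstRep PySem.Set.empty s).getD ' ')

-- ===== PRECONDITION & SPEC =====
-- Pre_f: str(number) must contain some repeated character; otherwise A raises IndexError
-- (stri_repeated[0] on "") and B raises ValueError.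
def Pre_f (number : Int) : Prop := ¬ (PySem.Int.toChars number).Nodup
instance (number : Int) : Decidable (Pre_f number) := by unfold Pre_f; infer_instance

def pvWitness_f : Int := 1221

def Spec_f (number : Int) (out : Int) : Prop := out = f_alt number
instance (number : Int) (out : Int) : Decidable (Spec_f number out) := by unfold Spec_f; infer_instance

-- ===== CLAIM (what is proved, stated in full; the proofs are below) =====
def Claim_equal_f : Prop := ∀ (number : Int), Dom_f number → Pre_f number → Spec_f number (f number)

-- ===== LEMMAS AND PROOFS =====

-- the list of repeated occurrences A accumulates, relative to an already-seen list a
def pvRep (a : List Char) : List Char → List Char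
  | [] => []
  | c :: t => if c ∈ a then c :: pvRep a t else pvRep (a ++ [c]) t

lemma pv_foldA (l : List Char) : ∀ a b : List Char,
    (l.foldl pvStepA (a, b)).2 = b ++ pvRep a l := by
  induction l with
  | nil => intro a b; simp [pvRep]
  | cons c t ih =>
    intro a b
    by_cases h : c ∈ a
    · have hA : pvStepA (a, b) c = (a, b ++ [c]) := by simp [pvStepA, h]
      simp [List.foldl_cons, hA, ih, pvRep, h]
    · have hA : pvStepA (a, b) c = (a ++ [c], b) := by simp [pvStepA, h]
      simp [List.foldl_cons, hA, ih, pvRep, h]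

lemma pv_rep_nil (l : List Char) : ∀ a : List Char,
    pvRep a l = [] → l.Nodup ∧ ∀ x ∈ l, x ∉ a := by
  induction l with
  | nil => intro a _; exact ⟨List.nodup_nil, by simp⟩
  | cons c t ih =>
    intro a h
    by_cases hc : c ∈ a
    · simp [pvRep, hc] at h
    · rw [pvRep, if_neg hc] at h
      obtain ⟨hnd, habs⟩ := ih _ h
      refine ⟨List.nodup_cons.mpr ⟨fun hm => (habs c hm) (by simp), hnd⟩, ?_⟩
      intro x hx
      rcases List.mem_cons.mp hx with rfl | hx
      · exact hc
      · exact fun hxa => (habs x hx) (by simp [hxa])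

-- count of x in the repeated list: every occurrence beyond the first (or every one if already seen)
lemma pv_rep_count (l : List Char) : ∀ (a : List Char) (x : Char),
    (pvRep a l).count x = l.count x - (if x ∈ a then 0 else 1) := by
  induction l with
  | nil => intro a x; simp [pvRep]
  | cons c t ih =>
    intro a x
    by_cases hc : c ∈ a
    · rw [pvRep, if_pos hc]
      by_cases hx : x = c
      · subst hx
        simp [List.count_cons_self, ih, hc]
      · simp [List.count_cons_of_ne, ih, Ne.symm hx]
    · rw [pvRep, if_neg hc]
      rw [ih (a ++ [c]) x]
      by_cases hx : x = c
      · subst hx; simp [hc]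
      · have : (x ∈ a ++ [c]) ↔ x ∈ a := by simp [hx]
        simp [this, List.count_cons_of_ne, Ne.symm hx]

lemma pv_mem_rep (l : List Char) (x : Char) : x ∈ pvRep [] l ↔ 2 ≤ l.count x := by
  rw [← List.count_pos_iff, pv_rep_count l [] x]
  simp; omega

-- the early-return seen-set scan returns the head of A's repeated list
lemma pv_firstRep (l : List Char) : ∀ (seen : PySem.Set Char) (a : List Char),
    (∀ x, x ∈ seen ↔ x ∈ a) → pvFirstRep seen l = (pvRep a l).head? := by
  induction l with
  | nil => intro seen a _; simp [pvFirstRep, pvRep]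
  | cons c t ih =>
    intro seen a hmem
    by_cases hc : c ∈ a
    · have : PySem.Set.contains seen c = true := by
        simp [PySem.Set.contains]; exact (hmem c).mpr hc
      rw [pvFirstRep, this]
      simp [pvRep, hc]
    · have hnc : PySem.Set.contains seen c = false := by
        simp [PySem.Set.contains]; exact fun h => hc ((hmem c).mp h)
      rw [pvFirstRep, hnc]
      simp only [Bool.false_eq_true, if_false]
      rw [pvRep, if_neg hc]
      exact ih _ _ (by intro x; rw [PySem.Set.mem_add, hmem x]; simp)

-- count-weighted sum over the counter = per-occurrence sum over A's repeated list
lemma pv_sumB (s : List Char) :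
    ((((PySem.Dict.counter s).items.filter (fun p => 1 < p.2)).map
        (fun p => pvVal p.1 * (p.2 - 1))).sum)
      = ((pvRep [] s).map pvVal).sum := by
  rw [PySem.Dict.items_counter, List.filter_map, List.map_map]
  simp only [Function.comp_def]
  have hnd : ((PySem.Set.ofList s).filter
      (fun k => decide (1 < ((s.count k : Nat) : Int)))).Nodup :=
    (PySem.Set.nodup_ofList s).filter _
  rw [← List.sum_toFinset _ hnd, List.toFinset_filter]
  rw [Finset.sum_list_map_count]
  rw [Finset.sum_filter]
  simp only [decide_eq_true_eq]
  have hsub : (pvRep [] s).toFinset ⊆ s.toFinset := by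
    intro x hx
    rw [List.mem_toFinset] at *
    have := (pv_mem_rep s x).mp hx
    exact List.count_pos_iff.mp (by omega)
  rw [Finset.sum_subset hsub (by
    intro x _ hxr
    rw [List.mem_toFinset] at hxr
    rw [List.count_eq_zero_of_not_mem hxr]
    simp)]
  · have hset : (PySem.Set.ofList s).toFinset = s.toFinset := by
      ext x; simp [List.mem_toFinset, PySem.Set.mem_ofList]
    rw [hset]
    apply Finset.sum_congr rfl
    intro x hx
    rw [List.mem_toFinset] at hx
    have h1 : 0 < s.count x := List.count_pos_iff.mpr hx
    rw [pv_rep_count s [] x]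
    have he : (if x ∈ ([] : List Char) then 0 else 1) = 1 := by simp
    rw [he, nsmul_eq_mul]
    by_cases h2 : 2 ≤ s.count x
    · rw [if_pos (by omega), Nat.cast_sub (by omega : 1 ≤ s.count x)]
      push_cast
      ring
    · rw [if_neg (by omega)]
      have hz : s.count x - 1 = 0 := by omega
      rw [hz]; simp

-- ===== VERDICT (by name: the statement is the Claim_ definition above) =====
theorem f_spec : Claim_equal_f := by
  intro number _ hpre
  unfold Spec_f f f_alt
  simp only []
  rw [pv_foldA, PySem.Dict.foldl_insert_getD_add_one_eq_counter, pv_sumB]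
  rw [pv_firstRep (PySem.Int.toChars number) PySem.Set.empty [] (by simp [PySem.Set.empty])]
  cases hr : pvRep [] (PySem.Int.toChars number) with
  | nil => exact absurd (pv_rep_nil (PySem.Int.toChars number) [] hr).1 hpre
  | cons c0 rest =>
    have h0 : PySem.List.pyGet? (c0 :: rest) 0 = some c0 := by
      simp [PySem.List.pyGet?, PySem.List.pyIdx?]
    rw [List.nil_append, h0]
    rw [PySem.List.foldl_add (g := pvVal)]
    simp [List.map_append, List.sum_append]
    ring
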